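-- pv_equiv track=rewrite | github.com/shivam5992/tweetengine | tweetprocess.py | remove_special
-- ===== SOURCE A (Python) =====
-- removable = ['!', '"', '#', '$', '%', '&', "'", '(', ')', '*', '+', ',', '-', '.', '/', ':', ';', '<', '=', '>', '?', '@', '[', '\\', ']', '^', '_', '`', '{', '|', '}', '~']
--
-- def remove_special(text, excpt=None):
-- 	if excpt == None:
-- 		for x in removable:
-- 			if x in text:
-- 				text = text.replace(x," ")
-- 	else:
-- 		for spchar in removable:
-- 			if spchar not in excpt:
-- 				text = text.replace(spchar, " ")
-- 	text = " ".join(text.split()).strip()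
-- 	return text
-- ===== SOURCE B (Python) =====
-- removable = ['!', '"', '#', '$', '%', '&', "'", '(', ')', '*', '+', ',', '-', '.', '/', ':', ';', '<', '=', '>', '?', '@', '[', '\\', ']', '^', '_', '`', '{', '|', '}', '~']
--
-- def remove_special(text, excpt=None):
--     if excpt is None:
--         remove_set = set(removable)
--     else:
--         remove_set = {c for c in removable if c not in excpt}
--     cleaned = ''.join(' ' if c in remove_set else c for c in text)
--     return ' '.join(cleaned.split()).strip()
-- ===== Notes on version B (the rewrite author's own statement) =====
-- stated objective: alternative
-- what changed: Replaces A's 32 whole-string replace passes (one per special character) with a removal set built once and a single character-wise pass over the text; the final whitespace normalization is kept verbatim.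
import Mathlib
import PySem

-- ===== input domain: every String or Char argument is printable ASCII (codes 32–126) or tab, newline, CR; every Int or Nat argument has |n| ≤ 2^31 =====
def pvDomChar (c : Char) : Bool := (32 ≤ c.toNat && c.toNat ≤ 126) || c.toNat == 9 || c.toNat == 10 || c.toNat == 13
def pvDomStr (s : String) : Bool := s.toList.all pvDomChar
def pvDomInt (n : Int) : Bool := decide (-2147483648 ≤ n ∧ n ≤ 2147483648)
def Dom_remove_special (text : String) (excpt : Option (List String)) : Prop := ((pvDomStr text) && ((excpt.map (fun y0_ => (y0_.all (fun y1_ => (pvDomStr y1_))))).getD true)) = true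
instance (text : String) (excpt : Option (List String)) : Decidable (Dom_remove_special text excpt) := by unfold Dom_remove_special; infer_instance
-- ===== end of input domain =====

-- B builds the removal set once and makes a single character-wise pass over the text
-- instead of A's 32 whole-string replace passes; the whitespace normalization is identical.


-- the module constant: the 32 removable special characters, as 1-char strings
def removableStrs : List String :=
  ["!", "\"", "#", "$", "%", "&", "'", "(", ")", "*", "+", ",", "-", ".", "/", ":",
   ";", "<", "=", ">", "?", "@", "[", "\\", "]", "^", "_", "`", "{", "|", "}", "~"]

-- ===== PORT A =====
def remove_special (text : String) (excpt : Option (List String)) : String :=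
  let t :=
    match excpt with
    | none =>
        removableStrs.foldl
          (fun t x => if PySem.Str.isIn x t then PySem.Str.replace t x " " else t) text
    | some e =>
        removableStrs.foldl
          (fun t spchar => if spchar ∈ e then t else PySem.Str.replace t spchar " ") text
  PySem.Str.strip (PySem.Str.join " " (PySem.Str.split₀ t))

-- ===== PORT B =====
def remove_special_alt (text : String) (excpt : Option (List String)) : String :=
  let removeSet : PySem.Set String :=
    match excpt with
    | none => PySem.Set.ofList removableStrs
    | some e => PySem.Set.ofList (removableStrs.filter (fun c => !(e.contains c)))
  let cleaned := String.ofList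
    (text.toList.map (fun c => if removeSet.contains (String.ofList [c]) then ' ' else c))
  PySem.Str.strip (PySem.Str.join " " (PySem.Str.split₀ cleaned))

-- ===== PRECONDITION & SPEC =====
def Spec_remove_special (text : String) (excpt : Option (List String)) (out : String) : Prop := out = remove_special_alt text excpt
instance (text : String) (excpt : Option (List String)) (out : String) : Decidable (Spec_remove_special text excpt out) := by unfold Spec_remove_special; infer_instance

-- ===== CLAIM (what is proved, stated in full; the proofs are below) =====
def Claim_equal_remove_special : Prop := ∀ (text : String) (excpt : Option (List String)), Dom_remove_special text excpt → Spec_remove_special text excpt (remove_special text excpt)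

-- ===== LEMMAS AND PROOFS =====

-- replacing the single character x by ' ' is a character-wise map
theorem replace_single (x : Char) (s : List Char) :
    PySem.Chars.replace s [x] [' '] = s.map (fun c => if c = x then ' ' else c) := by
  have go : ∀ (l acc : List Char) (fuel : Nat), l.length ≤ fuel →
      PySem.Chars.replace.go [x] [' '] fuel l acc
        = acc.reverse ++ l.map (fun c => if c = x then ' ' else c) := by
    intro l
    induction l with
    | nil => intro acc fuel _; cases fuel <;> simp [PySem.Chars.replace.go]
    | cons c t ih =>
        intro acc fuel hf
        cases fuel with
        | zero => simp at hf
        | succ n =>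
            by_cases hc : c = x
            · subst hc
              simp [PySem.Chars.replace.go, List.isPrefixOf, ih (' ' :: acc) n (by simpa using hf)]
            · have hpre : List.isPrefixOf [x] (c :: t) = false := by
                simp [List.isPrefixOf]; intro h; exact absurd h.symm hc
              simp [PySem.Chars.replace.go, hpre, ih (c :: acc) n (by simpa using hf), hc]
  simp [PySem.Chars.replace, go s [] s.length le_rfl]

-- mapping a single-character substitution over s is the identity when x does not occur
theorem map_single_id (x : Char) (s : List Char) (hx : x ∉ s) :
    s.map (fun c => if c = x then ' ' else c) = s := by
  have h : ∀ c ∈ s, (if c = x then ' ' else c) = id c := by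
    intro c hc
    rw [if_neg (by intro hcx; exact hx (hcx ▸ hc))]; rfl
  rw [List.map_congr_left h, List.map_id]

-- a fold of single-char replaces is one character-wise map keyed by membership
theorem foldl_replace_chain (xs : List Char) (s : List Char) :
    xs.foldl (fun t x => PySem.Chars.replace t [x] [' ']) s
      = s.map (fun c => if c ∈ xs then ' ' else c) := by
  induction xs generalizing s with
  | nil => simp
  | cons x rest ih =>
      rw [List.foldl_cons, replace_single, ih, List.map_map]
      refine List.map_congr_left (fun c _ => ?_)
      by_cases hc : c = x
      · subst hc
        by_cases hr : c ∈ rest <;> simp [hr]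
      · simp [Function.comp, hc]

-- the guarded replace of A's none-branch is the unguarded replace, at the char level
theorem guarded_replace (x : Char) (t : List Char) :
    (if PySem.Chars.isIn [x] t then PySem.Chars.replace t [x] [' '] else t)
      = PySem.Chars.replace t [x] [' '] := by
  by_cases h : PySem.Chars.isIn [x] t = true
  · simp [h]
  · simp only [Bool.not_eq_true] at h
    have hinf := (PySem.Chars.isIn_eq_false_iff [x] t).mp h
    have hx : x ∉ t := fun hm => by
      obtain ⟨u, v, huv⟩ := List.append_of_mem hm
      exact hinf ⟨u, v, by simp [huv]⟩
    simp [h, replace_single, map_single_id x t hx]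

-- one string-level replace of a single character, moved to the char level
theorem str_replace_single (x : Char) (s : String) :
    PySem.Str.replace s (String.ofList [x]) " "
      = String.ofList (PySem.Chars.replace s.toList [x] [' ']) := by
  simp [PySem.Str.replace]

-- the guarded replace of A's none-branch is the unguarded replace, at the string level
theorem str_guard (x : Char) (t : String) :
    (if PySem.Str.isIn (String.ofList [x]) t then PySem.Str.replace t (String.ofList [x]) " " else t)
      = PySem.Str.replace t (String.ofList [x]) " " := by
  have hb : PySem.Str.isIn (String.ofList [x]) t = PySem.Chars.isIn [x] t.toList := by
    simp [PySem.Str.isIn]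
  by_cases h : PySem.Chars.isIn [x] t.toList = true
  · simp [h]
  · simp only [Bool.not_eq_true] at h
    rw [hb, h, if_neg (by simp), str_replace_single]
    have := guarded_replace x t.toList
    rw [h, if_neg (by simp)] at this
    rw [← this]
    simp

-- a string-level fold of single-char replaces is the char-level fold, ofList-wrapped
theorem strfold_replace (xs : List Char) (s : String) :
    xs.foldl (fun t x => PySem.Str.replace t (String.ofList [x]) " ") s
      = String.ofList (xs.foldl (fun t x => PySem.Chars.replace t [x] [' ']) s.toList) := by
  induction xs generalizing s with
  | nil => simp
  | cons x rest ih =>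
      simp only [List.foldl_cons]
      rw [str_replace_single, ih]
      simp

-- a fold whose step is the identity off p is a fold over the filter
theorem foldl_filter_id {α β : Type} (p : β → Bool) (f : α → β → α) (l : List β) (a : α)
    (h : ∀ t x, p x = false → f t x = t) :
    l.foldl f a = (l.filter p).foldl f a := by
  induction l generalizing a with
  | nil => rfl
  | cons x t ih =>
      by_cases hx : p x = true
      · simp [hx, ih]
      · simp only [Bool.not_eq_true] at hx
        simp [hx, h a x hx, ih]

def removableChars : List Char :=
  ['!', '"', '#', '$', '%', '&', '\'', '(', ')', '*', '+', ',', '-', '.', '/', ':',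
   ';', '<', '=', '>', '?', '@', '[', '\\', ']', '^', '_', '`', '{', '|', '}', '~']

theorem removableStrs_eq : removableStrs = removableChars.map (fun c => String.ofList [c]) := rfl

theorem ofList_singleton_mem_map (c : Char) (xs : List Char) :
    (String.ofList [c] ∈ xs.map (fun d => String.ofList [d])) ↔ c ∈ xs := by
  simp only [List.mem_map]
  constructor
  · rintro ⟨d, hd, he⟩
    have hdc : d = c := by
      have := congrArg String.toList he; simpa using this
    exact hdc ▸ hd
  · exact fun h => ⟨c, h, rfl⟩

-- ===== VERDICT (by name: the statement is the Claim_ definition above) =====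
theorem remove_special_spec : Claim_equal_remove_special := by
  intro text excpt _
  unfold Spec_remove_special remove_special remove_special_alt
  cases excpt with
  | none =>
      simp only [removableStrs_eq, List.foldl_map, str_guard, strfold_replace,
        foldl_replace_chain]
      have hmap : ∀ c : Char, (if c ∈ removableChars then ' ' else c)
          = (if (PySem.Set.ofList (removableChars.map (fun d => String.ofList [d]))).contains
              (String.ofList [c]) then ' ' else c) := by
        intro c
        have h1 : (PySem.Set.ofList (removableChars.map (fun d => String.ofList [d]))).contains
            (String.ofList [c]) = true ↔ c ∈ removableChars := by
          rw [PySem.Set.contains_iff, PySem.Set.mem_ofList]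
          exact ofList_singleton_mem_map c removableChars
        by_cases h : c ∈ removableChars
        · rw [if_pos h, if_pos (h1.mpr h)]
        · rw [if_neg h, if_neg (fun hc => h (h1.mp hc))]
      rw [List.map_congr_left (fun c _ => hmap c)]
      rfl
  | some e =>
      simp only [removableStrs_eq, List.foldl_map]
      rw [foldl_filter_id (fun x => !(decide ((String.ofList [x]) ∈ e)))
          (fun t x => if (String.ofList [x]) ∈ e then t else PySem.Str.replace t (String.ofList [x]) " ")
          removableChars text
          (by intro t x hx; simp at hx; simp [hx])]
      have hstep : ∀ (t : String) (x : Char),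
          x ∈ removableChars.filter (fun x => !(decide ((String.ofList [x]) ∈ e))) →
          (if (String.ofList [x]) ∈ e then t else PySem.Str.replace t (String.ofList [x]) " ")
            = PySem.Str.replace t (String.ofList [x]) " " := by
        intro t x hx
        simp only [List.mem_filter] at hx
        simp [of_decide_eq_false (by simpa using hx.2)]
      rw [PySem.List.foldl_congr_mem _ _ _ _ (fun acc x hx => hstep acc x hx), strfold_replace, foldl_replace_chain]
      have hmap : ∀ c : Char,
          (if c ∈ removableChars.filter (fun x => !(decide ((String.ofList [x]) ∈ e))) then ' ' else c)
          = (if (PySem.Set.ofList ((removableChars.map (fun d => String.ofList [d])).filter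
                (fun s => !(e.contains s)))).contains (String.ofList [c]) then ' ' else c) := by
        intro c
        have hiff : (String.ofList [c]) ∈ (removableChars.map (fun d => String.ofList [d])).filter
              (fun s => !(e.contains s))
            ↔ c ∈ removableChars.filter (fun x => !(decide ((String.ofList [x]) ∈ e))) := by
          simp only [List.mem_filter]
          constructor
          · rintro ⟨hm, hc⟩
            exact ⟨(ofList_singleton_mem_map c removableChars).mp hm, by simpa using hc⟩
          · rintro ⟨hm, hc⟩
            exact ⟨(ofList_singleton_mem_map c removableChars).mpr hm, by simpa using hc⟩
        have h1 : (PySem.Set.ofList ((removableChars.map (fun d => String.ofList [d])).filter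
              (fun s => !(e.contains s)))).contains (String.ofList [c]) = true
            ↔ c ∈ removableChars.filter (fun x => !(decide ((String.ofList [x]) ∈ e))) := by
          rw [PySem.Set.contains_iff, PySem.Set.mem_ofList]
          exact hiff
        by_cases h : c ∈ removableChars.filter (fun x => !(decide ((String.ofList [x]) ∈ e)))
        · rw [if_pos h, if_pos (h1.mpr h)]
        · rw [if_neg h, if_neg (fun hc => h (h1.mp hc))]
      rw [List.map_congr_left (fun c _ => hmap c)]
      rfl
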